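-- pv_equiv track=rewrite | github.com/fsluiz/MST | QW_MST_DMC_vs_Others.py | kruskal_mdc
-- ===== SOURCE A (Python) =====
-- class UnionFind:
--     def __init__(self, n):
--         self.parent = list(range(n))
--         self.rank = [0] * n
--
--     def find(self, u):
--         if self.parent[u] != u:
--             self.parent[u] = self.find(self.parent[u])  # Path compression
--         return self.parent[u]
--
--     def union(self, u, v):
--         root_u = self.find(u)
--         root_v = self.find(v)
--         if root_u != root_v:
--             if self.rank[root_u] > self.rank[root_v]:
--                 self.parent[root_v] = root_u
--             elif self.rank[root_u] < self.rank[root_v]: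
--                 self.parent[root_u] = root_v
--             else:
--                 self.parent[root_v] = root_u
--                 self.rank[root_u] += 1
--
-- def kruskal_mdc(vertices, edges, max_degree):
--     # Ordena as arestas pelo peso
--     edges.sort(key=lambda x: x[2])  # x[2] é o peso da aresta
--
--     uf = UnionFind(vertices)
--     mst = []
--     degree = [0] * vertices  # Inicializa o grau de cada vértice
--
--     for u, v, weight in edges:
--         if uf.find(u) != uf.find(v):  # Verifica se u e v estão em componentes diferentes
--             if degree[u] < max_degree and degree[v] < max_degree:
--                 uf.union(u, v)
--                 mst.append((u, v, weight))
--                 degree[u] += 1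
--                 degree[v] += 1
--
--     return mst
-- ===== SOURCE B (Python) =====
-- def kruskal_mdc(vertices, edges, max_degree):
--     # Quick-find: one component label per vertex instead of a union-find forest.
--     # Note: like A, this sorts `edges` in place (observable side effect).
--     edges.sort(key=lambda x: x[2])
--
--     label = list(range(vertices))
--     mst = []
--     degree = [0] * vertices
--
--     for u, v, weight in edges:
--         if label[u] != label[v]:
--             if degree[u] < max_degree and degree[v] < max_degree:
--                 new, old = label[u], label[v]
--                 for i in range(vertices):
--                     if label[i] == old:
--                         label[i] = new
--                 mst.append((u, v, weight))
--                 degree[u] += 1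
--                 degree[v] += 1
--
--     return mst
-- ===== Notes on version B (the rewrite author's own statement) =====
-- stated objective: alternative
-- what changed: Replaced the rank/path-compression union-find forest (recursive find with parent rewriting, union by rank) by a quick-find component-label array: connectivity is one label comparison and a union relabels every vertex of the absorbed component in a single scan.
import Mathlib
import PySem

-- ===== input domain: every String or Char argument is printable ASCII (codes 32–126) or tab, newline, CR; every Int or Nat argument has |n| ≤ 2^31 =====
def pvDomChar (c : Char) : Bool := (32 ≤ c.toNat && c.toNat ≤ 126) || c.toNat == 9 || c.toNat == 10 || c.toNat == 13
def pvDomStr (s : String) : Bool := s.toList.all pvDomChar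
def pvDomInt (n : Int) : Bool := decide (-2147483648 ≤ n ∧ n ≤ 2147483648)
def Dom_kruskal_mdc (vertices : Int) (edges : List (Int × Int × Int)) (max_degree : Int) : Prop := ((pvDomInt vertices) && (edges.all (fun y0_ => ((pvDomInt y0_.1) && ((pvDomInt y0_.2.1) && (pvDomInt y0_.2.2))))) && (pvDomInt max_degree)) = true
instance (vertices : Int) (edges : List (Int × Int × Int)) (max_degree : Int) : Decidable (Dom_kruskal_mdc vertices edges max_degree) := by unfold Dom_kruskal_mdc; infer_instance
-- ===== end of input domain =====

-- B replaces A's rank/path-compression union-find by a quick-find component-label array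
-- (connectivity = one label comparison; union = relabel scan); same sort, same degree rule.
-- Both Pythons sort `edges` in place; the equivalence proved here is about the RETURN value only.

-- ===== PORT A =====
-- list read xs[i] / write xs[i] = v with Python index semantics (negative = from the end)
def pvGetI (xs : List Int) (i : Int) : Int := PySem.List.pyGetD xs i 0
def pvSetI (xs : List Int) (i v : Int) : List Int := PySem.List.pySetD xs i v

-- UnionFind.find with path compression; `fuel` only makes the recursion structural
-- (it is never exhausted on inputs satisfying Pre_). Returns (root, updated parent).
def ufFind (fuel : Nat) (parent : List Int) (u : Int) : Int × List Int :=
  match fuel with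
  | 0 => (u, parent)
  | fuel + 1 =>
    let pu := pvGetI parent u
    if pu = u then (u, parent)
    else
      let r := ufFind fuel parent pu
      (r.1, pvSetI r.2 u r.1)

-- UnionFind.union (by rank); returns (parent, rank)
def ufUnion (fuel : Nat) (parent rank : List Int) (u v : Int) : List Int × List Int :=
  let fu := ufFind fuel parent u
  let fv := ufFind fuel fu.2 v
  if fu.1 ≠ fv.1 then
    if pvGetI rank fu.1 > pvGetI rank fv.1 then (pvSetI fv.2 fv.1 fu.1, rank)
    else if pvGetI rank fu.1 < pvGetI rank fv.1 then (pvSetI fv.2 fu.1 fv.1, rank)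
    else (pvSetI fv.2 fv.1 fu.1, pvSetI rank fu.1 (pvGetI rank fu.1 + 1))
  else (fv.2, rank)

def kruskalLoopA (fuel : Nat) (md : Int) :
    List (Int × Int × Int) → List Int → List Int → List Int → List (Int × Int × Int) →
    List (Int × Int × Int)
  | [], _, _, _, mst => mst
  | (u, v, w) :: rest, parent, rank, deg, mst =>
    let fu := ufFind fuel parent u
    let fv := ufFind fuel fu.2 v
    if fu.1 ≠ fv.1 then
      if pvGetI deg u < md ∧ pvGetI deg v < md then
        let pr := ufUnion fuel fv.2 rank u v
        let d1 := pvSetI deg u (pvGetI deg u + 1)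
        let d2 := pvSetI d1 v (pvGetI d1 v + 1)
        kruskalLoopA fuel md rest pr.1 pr.2 d2 (mst ++ [(u, v, w)])
      else kruskalLoopA fuel md rest fv.2 rank deg mst
    else kruskalLoopA fuel md rest fv.2 rank deg mst

def kruskal_mdc (vertices : Int) (edges : List (Int × Int × Int)) (max_degree : Int) : List (Int × Int × Int) :=
  let es := PySem.List.sorted edges (fun x => x.2.2) false
  let n := vertices.toNat
  kruskalLoopA (n + es.length) max_degree es ((List.range n).map Int.ofNat)
    (List.replicate n 0) (List.replicate n 0) []

-- ===== PORT B =====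
def kruskalLoopB (md : Int) :
    List (Int × Int × Int) → List Int → List Int → List (Int × Int × Int) →
    List (Int × Int × Int)
  | [], _, _, mst => mst
  | (u, v, w) :: rest, lab, deg, mst =>
    if pvGetI lab u ≠ pvGetI lab v then
      if pvGetI deg u < md ∧ pvGetI deg v < md then
        let nw := pvGetI lab u
        let old := pvGetI lab v
        let d1 := pvSetI deg u (pvGetI deg u + 1)
        let d2 := pvSetI d1 v (pvGetI d1 v + 1)
        kruskalLoopB md rest (lab.map fun t => if t = old then nw else t) d2 (mst ++ [(u, v, w)])
      else kruskalLoopB md rest lab deg mst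
    else kruskalLoopB md rest lab deg mst

def kruskal_mdc_alt (vertices : Int) (edges : List (Int × Int × Int)) (max_degree : Int) : List (Int × Int × Int) :=
  let es := PySem.List.sorted edges (fun x => x.2.2) false
  let n := vertices.toNat
  kruskalLoopB max_degree es ((List.range n).map Int.ofNat) (List.replicate n 0) []

-- ===== PRECONDITION & SPEC =====
-- Pre_: every edge endpoint is a valid Python index into the vertex lists
-- (A raises IndexError exactly when some endpoint is < -vertices or ≥ vertices).
def Pre_kruskal_mdc (vertices : Int) (edges : List (Int × Int × Int)) (max_degree : Int) : Prop :=
  ∀ t ∈ edges, -vertices ≤ t.1 ∧ t.1 < vertices ∧ -vertices ≤ t.2.1 ∧ t.2.1 < vertices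
instance (vertices : Int) (edges : List (Int × Int × Int)) (max_degree : Int) : Decidable (Pre_kruskal_mdc vertices edges max_degree) := by unfold Pre_kruskal_mdc; infer_instance

def pvWitness_kruskal_mdc : Int × (List (Int × Int × Int)) × Int := (3, [(0, 1, 5), (1, 2, 3), (-3, 2, 4)], 2)

def Spec_kruskal_mdc (vertices : Int) (edges : List (Int × Int × Int)) (max_degree : Int) (out : List (Int × Int × Int)) : Prop := out = kruskal_mdc_alt vertices edges max_degree
instance (vertices : Int) (edges : List (Int × Int × Int)) (max_degree : Int) (out : List (Int × Int × Int)) : Decidable (Spec_kruskal_mdc vertices edges max_degree out) := by unfold Spec_kruskal_mdc; infer_instance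

-- ===== CLAIM (what is proved, stated in full; the proofs are below) =====
def Claim_equal_kruskal_mdc : Prop := ∀ (vertices : Int) (edges : List (Int × Int × Int)) (max_degree : Int), Dom_kruskal_mdc vertices edges max_degree → Pre_kruskal_mdc vertices edges max_degree → Spec_kruskal_mdc vertices edges max_degree (kruskal_mdc vertices edges max_degree)

-- ===== LEMMAS AND PROOFS =====

-- ===== proof-side definitions =====
def inb (n : Nat) (x : Int) : Prop := 0 ≤ x ∧ x < (n : Int)

def EntriesP (n : Nat) (p : List Int) : Prop := ∀ x, inb n x → inb n (pvGetI p x)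

def itg (p : List Int) : Nat → Int → Int
  | 0, x => x
  | k + 1, x => itg p k (pvGetI p x)

def isRootP (p : List Int) (x : Int) : Prop := pvGetI p x = x

def rootf (p : List Int) : Nat → Int → Int
  | 0, x => x
  | f + 1, x => if pvGetI p x = x then x else rootf p f (pvGetI p x)

def ReachW (p : List Int) (f : Nat) (x : Int) : Prop := ∃ k ≤ f, isRootP p (itg p k x)

-- ===== small pvGetI/pvSetI lemmas =====
lemma pvGetI_eq_getElem (p : List Int) (x : Int) (h0 : 0 ≤ x) (h1 : x < (p.length : Int)) :
    pvGetI p x = p[x.toNat]'(by omega) := by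
  simp [pvGetI, PySem.List.pyGetD_eq_getElem p 0 h0 h1]

lemma pvSetI_length (p : List Int) (i v : Int) : (pvSetI p i v).length = p.length := by
  simp [pvSetI, PySem.List.pySetD, PySem.List.pySet?, PySem.List.pyIdx?]
  split_ifs <;> simp

lemma pvGetI_pvSetI (p : List Int) (i v x : Int) (hi : inb p.length i) (hx : inb p.length x) :
    pvGetI (pvSetI p i v) x = if x = i then v else pvGetI p x := by
  obtain ⟨hi0, hi1⟩ := hi
  obtain ⟨hx0, hx1⟩ := hx
  rw [pvSetI, PySem.List.pySetD_of_nonneg p v hi0]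
  rw [pvGetI_eq_getElem _ _ hx0 (by simpa using hx1), pvGetI_eq_getElem _ _ hx0 hx1]
  rw [List.getElem_set]
  by_cases h : x = i
  · rw [if_pos h, if_pos (by omega)]
  · rw [if_neg h, if_neg (by omega)]

lemma pvGetI_neg (p : List Int) (u : Int) (h0 : -(p.length : Int) ≤ u) (h1 : u < 0) :
    pvGetI p u = pvGetI p (u + p.length) := by
  simp only [pvGetI, PySem.List.pyGetD, PySem.List.pyGet?, PySem.List.pyIdx?]
  have hn : ¬ (0 ≤ u) := by omega
  have h2 : 0 ≤ u + (p.length : Int) := by omega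
  have h3 : u + (p.length : Int) < p.length := by omega
  rw [if_neg hn, if_pos h0, if_pos h2, if_pos h3]
  have : p.length - (-u).toNat = (u + p.length).toNat := by omega
  rw [this]

lemma pvSetI_neg (p : List Int) (u v : Int) (h0 : -(p.length : Int) ≤ u) (h1 : u < 0) :
    pvSetI p u v = pvSetI p (u + p.length) v := by
  simp only [pvSetI, PySem.List.pySetD, PySem.List.pySet?, PySem.List.pyIdx?]
  have hn : ¬ (0 ≤ u) := by omega
  have h2 : 0 ≤ u + (p.length : Int) := by omega
  have h3 : u + (p.length : Int) < p.length := by omega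
  rw [if_neg hn, if_pos h0, if_pos h2, if_pos h3]
  have : p.length - (-u).toNat = (u + p.length).toNat := by omega
  rw [this]

-- ===== itg / rootf lemmas =====
lemma itg_succ (p : List Int) (k : Nat) (x : Int) : itg p (k+1) x = itg p k (pvGetI p x) := rfl

lemma itg_root (p : List Int) (k : Nat) (z : Int) (h : isRootP p z) : itg p k z = z := by
  induction k with
  | zero => rfl
  | succ k ih => rw [itg_succ, h]; exact ih

lemma itg_add (p : List Int) (a b : Nat) (x : Int) : itg p (a + b) x = itg p b (itg p a x) := by
  induction a generalizing x with
  | zero => simp [itg]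
  | succ a ih => rw [Nat.succ_add, itg_succ, itg_succ, ih]

lemma rootf_succ_root (p : List Int) (f : Nat) (x : Int) (h : isRootP p x) :
    rootf p (f + 1) x = x := by
  unfold isRootP at h
  simp only [rootf]; rw [if_pos h]

lemma rootf_succ_not_root (p : List Int) (f : Nat) (x : Int) (h : ¬ isRootP p x) :
    rootf p (f + 1) x = rootf p f (pvGetI p x) := by
  unfold isRootP at h
  simp only [rootf]; rw [if_neg h]

lemma rootf_of_itg_root (p : List Int) (k f : Nat) (x : Int) (hk : k ≤ f)
    (h : isRootP p (itg p k x)) : rootf p f x = itg p k x := by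
  induction k generalizing x f with
  | zero =>
    cases f with
    | zero => rfl
    | succ f => exact rootf_succ_root p f x h
  | succ k ih =>
    obtain ⟨f, rfl⟩ : ∃ g, f = g + 1 := ⟨f - 1, by omega⟩
    by_cases hr : isRootP p x
    · rw [itg_root p _ x hr] at h ⊢
      exact rootf_succ_root p f x hr
    · rw [rootf_succ_not_root p f x hr]
      exact ih f (pvGetI p x) (by omega) h

lemma rootf_isRoot (p : List Int) (f : Nat) (x : Int) (h : ReachW p f x) :
    isRootP p (rootf p f x) ∧ ∃ k ≤ f, rootf p f x = itg p k x := by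
  obtain ⟨k, hk, hr⟩ := h
  rw [rootf_of_itg_root p k f x hk hr]
  exact ⟨hr, k, hk, rfl⟩

lemma itg_inb (n : Nat) (p : List Int) (hE : EntriesP n p) (k : Nat) (x : Int) (hx : inb n x) :
    inb n (itg p k x) := by
  induction k generalizing x with
  | zero => exact hx
  | succ k ih => rw [itg_succ]; exact ih _ (hE x hx)

-- ancestor which is a root IS the rootf
lemma root_ancestor_unique (p : List Int) (f k : Nat) (x r : Int) (h : ReachW p f x)
    (hr : isRootP p r) (hk : itg p k x = r) : rootf p f x = r := by
  obtain ⟨k0, hk0f, hk0⟩ := h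
  rcases le_total k0 k with hle | hle
  · obtain ⟨d, rfl⟩ : ∃ d, k = k0 + d := ⟨k - k0, by omega⟩
    rw [itg_add, itg_root p d _ hk0] at hk
    rw [rootf_of_itg_root p k0 f x hk0f hk0, hk]
  · obtain ⟨d, rfl⟩ : ∃ d, k0 = k + d := ⟨k0 - k, by omega⟩
    rw [rootf_of_itg_root p (k+d) f x hk0f hk0, itg_add, hk, itg_root p d r hr]

lemma reach_step (p : List Int) (f : Nat) (x : Int) (hnr : ¬ isRootP p x) (h : ReachW p f x) :
    1 ≤ f ∧ ReachW p (f - 1) (pvGetI p x) := by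
  obtain ⟨k, hk, hr⟩ := h
  cases k with
  | zero => exact absurd hr hnr
  | succ k => exact ⟨by omega, k, by omega, hr⟩

lemma rootf_get (p : List Int) (f : Nat) (x : Int) (hnr : ¬ isRootP p x) (h : ReachW p f x) :
    rootf p f (pvGetI p x) = rootf p f x := by
  obtain ⟨k, hk, hr⟩ := h
  cases k with
  | zero => exact absurd hr hnr
  | succ k =>
    rw [rootf_of_itg_root p (k+1) f x hk hr, rootf_of_itg_root p k f (pvGetI p x) (by omega) hr]
    rfl

-- ===== shortcut (path compression) =====
def ShortcutP (n : Nat) (p q : List Int) : Prop :=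
  q.length = p.length ∧ ∀ x, inb n x →
    pvGetI q x = pvGetI p x ∨ (isRootP p (pvGetI q x) ∧ ∃ k, itg p k x = pvGetI q x)

lemma shortcut_core (n f : Nat) (p q : List Int) (hE : EntriesP n p)
    (hH : ∀ x, inb n x → ReachW p f x) (hS : ShortcutP n p q) :
    ∀ k x, inb n x → isRootP p (itg p k x) →
      ∃ k' ≤ k, isRootP q (itg q k' x) ∧ itg q k' x = rootf p f x := by
  have hq_root : ∀ r, inb n r → isRootP p r → isRootP q r := by
    intro r hr hroot
    rcases hS.2 r hr with h | ⟨_, j, hanc⟩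
    · unfold isRootP at *; rw [h, hroot]
    · unfold isRootP at *
      rw [itg_root p j r hroot] at hanc
      exact hanc.symm
  intro k
  induction k with
  | zero =>
    intro x hx hroot
    simp only [itg] at hroot
    have hqx : pvGetI q x = x := by
      rcases hS.2 x hx with h | ⟨_, j, hanc⟩
      · unfold isRootP at hroot; rw [h, hroot]
      · rw [itg_root p j x hroot] at hanc; exact hanc.symm
    refine ⟨0, le_refl _, hqx, ?_⟩
    simp only [itg]
    exact (rootf_of_itg_root p 0 f x (Nat.zero_le _) hroot).symm
  | succ k ih =>
    intro x hx hroot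
    by_cases hr : isRootP p x
    · have hqx : pvGetI q x = x := by
        rcases hS.2 x hx with h | ⟨_, j, hanc⟩
        · unfold isRootP at hr; rw [h, hr]
        · rw [itg_root p j x hr] at hanc; exact hanc.symm
      refine ⟨0, Nat.zero_le _, hqx, ?_⟩
      simp only [itg]
      exact (rootf_of_itg_root p 0 f x (Nat.zero_le _) hr).symm
    · rcases hS.2 x hx with h | ⟨hrt, j, hanc⟩
      · -- get q x = get p x; use IH at get p x
        have hgx : inb n (pvGetI p x) := hE x hx
        have hroot' : isRootP p (itg p k (pvGetI p x)) := by rwa [← itg_succ]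
        obtain ⟨k', hk', hq, hv⟩ := ih (pvGetI p x) hgx hroot'
        refine ⟨k' + 1, by omega, ?_, ?_⟩
        · rw [itg_succ, h]; exact hq
        · rw [itg_succ, h, hv]
          exact rootf_get p f x hr (hH x hx)
      · -- get q x is a root ancestor: it IS the root
        have hval : pvGetI q x = rootf p f x :=
          (root_ancestor_unique p f j x (pvGetI q x) (hH x hx) hrt hanc).symm
        have hinb : inb n (pvGetI q x) := by
          rw [← hanc]; exact itg_inb n p hE j x hx
        refine ⟨1, by omega, ?_, ?_⟩
        · show isRootP q (itg q 0 (pvGetI q x))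
          simp only [itg]
          exact hq_root _ hinb hrt
        · show itg q 0 (pvGetI q x) = rootf p f x
          simpa [itg] using hval

lemma shortcut_spec (n f : Nat) (p q : List Int) (hl : p.length = n) (hE : EntriesP n p)
    (hH : ∀ x, inb n x → ReachW p f x) (hS : ShortcutP n p q) :
    q.length = n ∧ EntriesP n q ∧
      ∀ x, inb n x → ReachW q f x ∧ rootf q f x = rootf p f x := by
  refine ⟨hS.1.trans hl, ?_, ?_⟩
  · intro x hx
    rcases hS.2 x hx with h | ⟨_, j, hanc⟩
    · rw [h]; exact hE x hx
    · rw [← hanc]; exact itg_inb n p hE j x hx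
  · intro x hx
    obtain ⟨k, hkf, hroot⟩ := hH x hx
    obtain ⟨k', hk', hq, hv⟩ := shortcut_core n f p q hE hH hS k x hx hroot
    refine ⟨⟨k', by omega, hq⟩, ?_⟩
    rw [rootf_of_itg_root q k' f x (by omega) hq, hv]

-- ===== union write (attach root r2 below root r1) =====
lemma link_get (n : Nat) (p : List Int) (r1 r2 y : Int) (hl : p.length = n)
    (h2 : inb n r2) (hy : inb n y) :
    pvGetI (pvSetI p r2 r1) y = if y = r2 then r1 else pvGetI p y := by
  apply pvGetI_pvSetI <;> rw [hl] <;> assumption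

lemma link_core (n f : Nat) (p : List Int) (r1 r2 : Int) (hl : p.length = n)
    (hE : EntriesP n p) (hH : ∀ x, inb n x → ReachW p f x)
    (h1 : inb n r1) (h2 : inb n r2) (hr1 : isRootP p r1) (hr2 : isRootP p r2)
    (hne : r1 ≠ r2) :
    ∀ k x, inb n x → isRootP p (itg p k x) →
      ∃ k' ≤ k + 1, isRootP (pvSetI p r2 r1) (itg (pvSetI p r2 r1) k' x) ∧
        itg (pvSetI p r2 r1) k' x = (if rootf p f x = r2 then r1 else rootf p f x) := by
  set q := pvSetI p r2 r1 with hq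
  have hget : ∀ y, inb n y → pvGetI q y = if y = r2 then r1 else pvGetI p y :=
    fun y hy => link_get n p r1 r2 y hl h2 hy
  have hq_r1 : isRootP q r1 := by
    show pvGetI q r1 = r1
    rw [hget r1 h1, if_neg hne]; exact hr1
  have base : ∀ x, inb n x → isRootP p x →
      ∃ k' ≤ 1, isRootP q (itg q k' x) ∧
        itg q k' x = (if rootf p f x = r2 then r1 else rootf p f x) := by
    intro x hx hr
    have hrf : rootf p f x = x := rootf_of_itg_root p 0 f x (Nat.zero_le _) hr
    by_cases hx2 : x = r2
    · refine ⟨1, le_refl _, ?_, ?_⟩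
      · show isRootP q (itg q 0 (pvGetI q x))
        simp only [itg]
        rw [hget x hx, if_pos hx2]; exact hq_r1
      · show itg q 0 (pvGetI q x) = _
        simp only [itg]
        rw [hget x hx, if_pos hx2, hrf, if_pos hx2]
    · refine ⟨0, by omega, ?_, ?_⟩
      · show pvGetI q x = x
        rw [hget x hx, if_neg hx2]; exact hr
      · simp only [itg]
        rw [hrf, if_neg hx2]
  intro k
  induction k with
  | zero =>
    intro x hx hroot
    simp only [itg] at hroot
    exact base x hx hroot
  | succ k ih =>
    intro x hx hroot
    by_cases hr : isRootP p x
    · obtain ⟨k', hk', h⟩ := base x hx hr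
      exact ⟨k', by omega, h⟩
    · have hx2 : x ≠ r2 := fun h => hr (h ▸ hr2)
      have hgx : inb n (pvGetI p x) := hE x hx
      have hroot' : isRootP p (itg p k (pvGetI p x)) := by rwa [← itg_succ]
      obtain ⟨k', hk', hqr, hv⟩ := ih (pvGetI p x) hgx hroot'
      refine ⟨k' + 1, by omega, ?_, ?_⟩
      · rw [itg_succ, hget x hx, if_neg hx2]; exact hqr
      · rw [itg_succ, hget x hx, if_neg hx2, hv, rootf_get p f x hr (hH x hx)]

lemma link_spec (n f : Nat) (p : List Int) (r1 r2 : Int) (hl : p.length = n)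
    (hE : EntriesP n p) (hH : ∀ x, inb n x → ReachW p f x)
    (h1 : inb n r1) (h2 : inb n r2) (hr1 : isRootP p r1) (hr2 : isRootP p r2)
    (hne : r1 ≠ r2) :
    (pvSetI p r2 r1).length = n ∧ EntriesP n (pvSetI p r2 r1) ∧
      ∀ x, inb n x → ReachW (pvSetI p r2 r1) (f + 1) x ∧
        rootf (pvSetI p r2 r1) (f + 1) x = (if rootf p f x = r2 then r1 else rootf p f x) := by
  refine ⟨by rw [pvSetI_length, hl], ?_, ?_⟩
  · intro x hx
    rw [link_get n p r1 r2 x hl h2 hx]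
    split_ifs
    · exact h1
    · exact hE x hx
  · intro x hx
    obtain ⟨k, hkf, hroot⟩ := hH x hx
    obtain ⟨k', hk', hq, hv⟩ := link_core n f p r1 r2 hl hE hH h1 h2 hr1 hr2 hne k x hx hroot
    refine ⟨⟨k', by omega, hq⟩, ?_⟩
    rw [rootf_of_itg_root _ k' (f+1) x (by omega) hq, hv]

-- ===== ufFind characterization =====
lemma ufFind_at_root (fuel : Nat) (p : List Int) (z : Int) (h : isRootP p z) :
    ufFind fuel p z = (z, p) := by
  cases fuel with
  | zero => rfl
  | succ fuel =>
    unfold isRootP at h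
    simp only [ufFind]
    rw [if_pos h]

lemma ufFind_length (fuel : Nat) (p : List Int) (u : Int) :
    (ufFind fuel p u).2.length = p.length := by
  induction fuel generalizing p u with
  | zero => rfl
  | succ fuel ih =>
    simp only [ufFind]
    split_ifs
    · rfl
    · simp only [pvSetI_length]; exact ih p (pvGetI p u)

lemma find_spec (fuel : Nat) : ∀ (n f : Nat) (p : List Int) (u : Int),
    p.length = n → EntriesP n p → inb n u → ReachW p f u → f < fuel →
      (ufFind fuel p u).1 = rootf p f u ∧ ShortcutP n p (ufFind fuel p u).2 := by
  induction fuel with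
  | zero => intro n f p u _ _ _ _ h; omega
  | succ fuel ih =>
    intro n f p u hl hE hu hR hf
    by_cases hr : isRootP p u
    · rw [ufFind_at_root (fuel+1) p u hr]
      constructor
      · exact (rootf_of_itg_root p 0 f u (Nat.zero_le _) hr).symm
      · exact ⟨rfl, fun x _ => Or.inl rfl⟩
    · obtain ⟨hf1, hR'⟩ := reach_step p f u hr hR
      obtain ⟨f', rfl⟩ : ∃ g, f = g + 1 := ⟨f - 1, by omega⟩
      simp only [Nat.add_sub_cancel] at hR'
      have hnr' : pvGetI p u ≠ u := hr
      simp only [ufFind]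
      rw [if_neg hnr']
      have hgu : inb n (pvGetI p u) := hE u hu
      obtain ⟨ih1, ih2⟩ := ih n f' p (pvGetI p u) hl hE hgu hR' (by omega)
      have hroot_val : rootf p (f' + 1) u = rootf p f' (pvGetI p u) :=
        rootf_succ_not_root p f' u hr
      constructor
      · simpa using ih1.trans hroot_val.symm
      · -- Shortcut p (pvSetI p' u r) where (r, p') = ufFind fuel p (pvGetI p u)
        set r := (ufFind fuel p (pvGetI p u)).1 with hrdef
        set p' := (ufFind fuel p (pvGetI p u)).2 with hpdef
        have hrval : r = rootf p (f' + 1) u := by rw [hroot_val]; exact ih1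
        have hrroot : isRootP p r := by
          rw [hrval]
          exact (rootf_isRoot p (f'+1) u hR).1
        have hranc : ∃ k, itg p k u = r := by
          obtain ⟨k, _, hk⟩ := (rootf_isRoot p (f'+1) u hR).2
          exact ⟨k, by rw [← hk, hrval]⟩
        refine ⟨?_, ?_⟩
        · simp only [pvSetI_length]; exact ih2.1
        · intro x hx
          have hlen' : p'.length = n := ih2.1.trans hl
          by_cases hxu : x = u
          · subst hxu
            right
            have : pvGetI (pvSetI p' x r) x = r := by
              rw [pvGetI_pvSetI p' x r x (by rw [hlen']; exact hx) (by rw [hlen']; exact hx)]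
              simp
            rw [this]
            exact ⟨hrroot, hranc⟩
          · have : pvGetI (pvSetI p' u r) x = pvGetI p' x := by
              rw [pvGetI_pvSetI p' u r x (by rw [hlen']; exact hu) (by rw [hlen']; exact hx)]
              rw [if_neg hxu]
            rw [this]
            exact ih2.2 x hx

-- negative top-level index: ufFind at u equals ufFind at u + n (1 ≤ fuel)
lemma ufFind_neg (fuel : Nat) (n : Nat) (p : List Int) (u : Int) (hl : p.length = n)
    (hE : EntriesP n p) (h0 : -(n : Int) ≤ u) (h1 : u < 0) (hfuel : 1 ≤ fuel) :
    ufFind fuel p u = ufFind fuel p (u + n) := by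
  obtain ⟨fuel, rfl⟩ : ∃ g, fuel = g + 1 := ⟨fuel - 1, by omega⟩
  have hn1 : 1 ≤ n := by omega
  have hu' : inb n (u + n) := by unfold inb; omega
  have hgeq : pvGetI p u = pvGetI p (u + n) := by
    have := pvGetI_neg p u (by rw [hl]; exact h0) h1
    rwa [hl] at this
  have hginb : inb n (pvGetI p (u + n)) := hE _ hu'
  have hne_u : pvGetI p u ≠ u := by rw [hgeq]; rcases hginb with ⟨a, b⟩; omega
  simp only [ufFind]
  rw [if_neg hne_u]
  by_cases hroot : pvGetI p (u + n) = u + n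
  · rw [if_pos hroot, hgeq, hroot]
    rw [ufFind_at_root fuel p (u + n) hroot]
    have hset : pvSetI p u (u + n) = pvSetI p (u + n) (u + n) := by
      have := pvSetI_neg p u (u + n) (by rw [hl]; exact h0) h1
      rwa [hl] at this
    rw [hset]
    have hlt : (u + (n:Int)).toNat < p.length := by omega
    have hv : p[(u + (n:Int)).toNat]'hlt = u + (n:Int) := by
      have := pvGetI_eq_getElem p (u + (n:Int)) (by omega) (by omega)
      rw [hroot] at this
      exact this.symm
    have : pvSetI p (u + (n:Int)) (u + (n:Int)) = p := by
      rw [pvSetI, PySem.List.pySetD_of_nonneg p (u+(n:Int)) (by omega)]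
      calc p.set (u + (n:Int)).toNat (u + (n:Int))
          = p.set (u + (n:Int)).toNat (p[(u + (n:Int)).toNat]'hlt) := by rw [hv]
        _ = p := List.set_getElem_self hlt
    rw [this]
  · rw [if_neg hroot, hgeq]
    have hset : ∀ q : List Int, q.length = n → pvSetI q u = pvSetI q (u + n) := by
      intro q hq
      funext v
      have := pvSetI_neg q u v (by rw [hq]; exact h0) h1
      rwa [hq] at this
    rw [hset _ (by rw [ufFind_length, hl])]

-- ===== coupling of union-find roots with quick-find labels =====
def CoupleP (n f : Nat) (p lab : List Int) : Prop :=
  ∀ x y, inb n x → inb n y → (rootf p f x = rootf p f y ↔ pvGetI lab x = pvGetI lab y)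

-- normalized Python index
def nidx (n : Nat) (u : Int) : Int := if u < 0 then u + n else u

lemma nidx_inb (n : Nat) (u : Int) (h0 : -(n:Int) ≤ u) (h1 : u < (n:Int)) : inb n (nidx n u) := by
  unfold nidx inb; split_ifs <;> omega

lemma pvGetI_nidx (n : Nat) (p : List Int) (u : Int) (hl : p.length = n)
    (h0 : -(n:Int) ≤ u) (h1 : u < (n:Int)) : pvGetI p u = pvGetI p (nidx n u) := by
  unfold nidx
  split_ifs with h
  · have := pvGetI_neg p u (by omega) h
    rwa [hl] at this
  · rfl

lemma ufFind_nidx (fuel n : Nat) (p : List Int) (u : Int) (hl : p.length = n)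
    (hE : EntriesP n p) (h0 : -(n:Int) ≤ u) (h1 : u < (n:Int)) (hfuel : 1 ≤ fuel) :
    ufFind fuel p u = ufFind fuel p (nidx n u) := by
  unfold nidx
  split_ifs with h
  · exact ufFind_neg fuel n p u hl hE h0 h hfuel
  · rfl

lemma pvGetI_map (c : Int → Int) (lab : List Int) (x : Int) (hx : inb lab.length x) :
    pvGetI (lab.map c) x = c (pvGetI lab x) := by
  obtain ⟨h0, h1⟩ := hx
  rw [pvGetI_eq_getElem (lab.map c) x h0 (by simpa using h1),
      pvGetI_eq_getElem lab x h0 h1, List.getElem_map]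

lemma rootf_inb (n f : Nat) (p : List Int) (x : Int) (hE : EntriesP n p)
    (hx : inb n x) (hR : ReachW p f x) : inb n (rootf p f x) := by
  obtain ⟨k, hk, hr⟩ := hR
  rw [rootf_of_itg_root p k f x hk hr]
  exact itg_inb n p hE k x hx

lemma pv_collapse_eq (R1 R2 A B : Int) :
    ((if A = R2 then R1 else A) = (if B = R2 then R1 else B)) ↔
      (A = B ∨ ((A = R1 ∨ A = R2) ∧ (B = R1 ∨ B = R2))) := by
  split_ifs <;> omega

set_option maxHeartbeats 2000000 in
lemma couple_after_link (n f : Nat) (p q lab : List Int) (u' v' r1 r2 : Int)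
    (hlab : lab.length = n) (hu : inb n u') (hv : inb n v')
    (hC : CoupleP n f p lab)
    (hcase : (r1 = rootf p f u' ∧ r2 = rootf p f v') ∨ (r1 = rootf p f v' ∧ r2 = rootf p f u'))
    (hroot_eq : ∀ x, inb n x → rootf q (f+1) x = (if rootf p f x = r2 then r1 else rootf p f x)) :
    CoupleP n (f+1) q (lab.map fun t => if t = pvGetI lab v' then pvGetI lab u' else t) := by
  intro x y hx hy
  set nw := pvGetI lab u' with hnw
  set old := pvGetI lab v' with hold
  have hmapx : pvGetI (lab.map fun t => if t = old then nw else t) x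
      = (if pvGetI lab x = old then nw else pvGetI lab x) :=
    pvGetI_map _ lab x (by rw [hlab]; exact hx)
  have hmapy : pvGetI (lab.map fun t => if t = old then nw else t) y
      = (if pvGetI lab y = old then nw else pvGetI lab y) :=
    pvGetI_map _ lab y (by rw [hlab]; exact hy)
  rw [hroot_eq x hx, hroot_eq y hy, hmapx, hmapy]
  -- membership transfer
  have hmem : ∀ z, inb n z →
      ((rootf p f z = r1 ∨ rootf p f z = r2) ↔ (pvGetI lab z = nw ∨ pvGetI lab z = old)) := by
    intro z hz
    have h1 : rootf p f z = rootf p f u' ↔ pvGetI lab z = nw := hC z u' hz hu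
    have h2 : rootf p f z = rootf p f v' ↔ pvGetI lab z = old := hC z v' hz hv
    rcases hcase with ⟨e1, e2⟩ | ⟨e1, e2⟩ <;> rw [e1, e2] <;> tauto
  have hxy : rootf p f x = rootf p f y ↔ pvGetI lab x = pvGetI lab y := hC x y hx hy
  have hx' := hmem x hx
  have hy' := hmem y hy
  rw [pv_collapse_eq, pv_collapse_eq]
  tauto

set_option maxHeartbeats 2000000 in
lemma loop_eq (fuel n : Nat) (md : Int) :
    ∀ (rest : List (Int × Int × Int)) (p rk lab deg : List Int) (mst : List (Int × Int × Int)) (f : Nat),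
      p.length = n → lab.length = n → EntriesP n p →
      (∀ x, inb n x → ReachW p f x) →
      (∀ t ∈ rest, -(n:Int) ≤ t.1 ∧ t.1 < (n:Int) ∧ -(n:Int) ≤ t.2.1 ∧ t.2.1 < (n:Int)) →
      f + rest.length ≤ fuel →
      CoupleP n f p lab →
      kruskalLoopA fuel md rest p rk deg mst = kruskalLoopB md rest lab deg mst := by
  intro rest
  induction rest with
  | nil => intro p rk lab deg mst f _ _ _ _ _ _ _; rfl
  | cons hd tl ih =>
    intro p rk lab deg mst f hp hlab hE hH hB hfuel hC
    obtain ⟨u, v, w⟩ := hd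
    obtain ⟨hu0, hu1, hv0, hv1⟩ := hB (u, v, w) List.mem_cons_self
    have hBtl : ∀ t ∈ tl, -(n:Int) ≤ t.1 ∧ t.1 < (n:Int) ∧ -(n:Int) ≤ t.2.1 ∧ t.2.1 < (n:Int) :=
      fun t ht => hB t (List.mem_cons_of_mem _ ht)
    have hn1 : 1 ≤ n := by omega
    have hfuel1 : 1 ≤ fuel := by simp at hfuel; omega
    have hflt : f < fuel := by simp at hfuel; omega
    have hu'b : inb n (nidx n u) := nidx_inb n u hu0 hu1
    have hv'b : inb n (nidx n v) := nidx_inb n v hv0 hv1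
    -- A side: the two finds of the loop condition
    have hA1 : ufFind fuel p u = ufFind fuel p (nidx n u) :=
      ufFind_nidx fuel n p u hp hE hu0 hu1 hfuel1
    have hfs1 := find_spec fuel n f p (nidx n u) hp hE hu'b (hH _ hu'b) hflt
    have hss1 := shortcut_spec n f p (ufFind fuel p (nidx n u)).2 hp hE hH hfs1.2
    have hH1 : ∀ x, inb n x → ReachW (ufFind fuel p (nidx n u)).2 f x :=
      fun x hx => (hss1.2.2 x hx).1
    have hroot1 : ∀ x, inb n x → rootf (ufFind fuel p (nidx n u)).2 f x = rootf p f x :=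
      fun x hx => (hss1.2.2 x hx).2
    have hA2 : ufFind fuel (ufFind fuel p (nidx n u)).2 v
        = ufFind fuel (ufFind fuel p (nidx n u)).2 (nidx n v) :=
      ufFind_nidx fuel n _ v hss1.1 hss1.2.1 hv0 hv1 hfuel1
    have hfs2 := find_spec fuel n f (ufFind fuel p (nidx n u)).2 (nidx n v) hss1.1 hss1.2.1
      hv'b (hH1 _ hv'b) hflt
    have hss2 := shortcut_spec n f (ufFind fuel p (nidx n u)).2
      (ufFind fuel (ufFind fuel p (nidx n u)).2 (nidx n v)).2 hss1.1 hss1.2.1 hH1 hfs2.2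
    set p2 := (ufFind fuel (ufFind fuel p (nidx n u)).2 (nidx n v)).2 with hp2def
    have hp2 : p2.length = n := hss2.1
    have hE2 : EntriesP n p2 := hss2.2.1
    have hH2 : ∀ x, inb n x → ReachW p2 f x := fun x hx => (hss2.2.2 x hx).1
    have hroot2 : ∀ x, inb n x → rootf p2 f x = rootf p f x :=
      fun x hx => ((hss2.2.2 x hx).2).trans (hroot1 x hx)
    have hC2 : CoupleP n f p2 lab := by
      intro x y hx hy
      rw [hroot2 x hx, hroot2 y hy]
      exact hC x y hx hy
    have hval1 : (ufFind fuel p (nidx n u)).1 = rootf p f (nidx n u) := hfs1.1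
    have hval2 : (ufFind fuel (ufFind fuel p (nidx n u)).2 (nidx n v)).1
        = rootf p f (nidx n v) := hfs2.1.trans (hroot1 _ hv'b)
    -- label reads normalize
    have hLu : pvGetI lab u = pvGetI lab (nidx n u) := pvGetI_nidx n lab u hlab hu0 hu1
    have hLv : pvGetI lab v = pvGetI lab (nidx n v) := pvGetI_nidx n lab v hlab hv0 hv1
    simp only [kruskalLoopA, kruskalLoopB]
    rw [hA1, hA2, hval1, hval2, hLu, hLv]
    by_cases hc : rootf p f (nidx n u) = rootf p f (nidx n v)
    · have hlabeq : pvGetI lab (nidx n u) = pvGetI lab (nidx n v) :=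
        (hC _ _ hu'b hv'b).mp hc
      rw [if_neg (not_not_intro hc), if_neg (not_not_intro hlabeq)]
      exact ih p2 rk lab deg mst f hp2 hlab hE2 hH2 hBtl (by simp at hfuel ⊢; omega) hC2
    · have hlabne : pvGetI lab (nidx n u) ≠ pvGetI lab (nidx n v) :=
        fun h => hc ((hC _ _ hu'b hv'b).mpr h)
      rw [if_pos hc, if_pos hlabne]
      by_cases hd : pvGetI deg u < md ∧ pvGetI deg v < md
      · rw [if_pos hd, if_pos hd]
        -- union: two more finds on p2, then the rank-directed link
        have hA3 : ufFind fuel p2 u = ufFind fuel p2 (nidx n u) :=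
          ufFind_nidx fuel n p2 u hp2 hE2 hu0 hu1 hfuel1
        have hfs3 := find_spec fuel n f p2 (nidx n u) hp2 hE2 hu'b (hH2 _ hu'b) hflt
        have hss3 := shortcut_spec n f p2 (ufFind fuel p2 (nidx n u)).2 hp2 hE2 hH2 hfs3.2
        have hH3 : ∀ x, inb n x → ReachW (ufFind fuel p2 (nidx n u)).2 f x :=
          fun x hx => (hss3.2.2 x hx).1
        have hroot3 : ∀ x, inb n x → rootf (ufFind fuel p2 (nidx n u)).2 f x = rootf p f x :=
          fun x hx => ((hss3.2.2 x hx).2).trans (hroot2 x hx)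
        have hA4 : ufFind fuel (ufFind fuel p2 (nidx n u)).2 v
            = ufFind fuel (ufFind fuel p2 (nidx n u)).2 (nidx n v) :=
          ufFind_nidx fuel n _ v hss3.1 hss3.2.1 hv0 hv1 hfuel1
        have hfs4 := find_spec fuel n f (ufFind fuel p2 (nidx n u)).2 (nidx n v) hss3.1
          hss3.2.1 hv'b (hH3 _ hv'b) hflt
        have hss4 := shortcut_spec n f (ufFind fuel p2 (nidx n u)).2
          (ufFind fuel (ufFind fuel p2 (nidx n u)).2 (nidx n v)).2 hss3.1 hss3.2.1 hH3 hfs4.2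
        set p4 := (ufFind fuel (ufFind fuel p2 (nidx n u)).2 (nidx n v)).2 with hp4def
        have hp4 : p4.length = n := hss4.1
        have hE4 : EntriesP n p4 := hss4.2.1
        have hH4 : ∀ x, inb n x → ReachW p4 f x := fun x hx => (hss4.2.2 x hx).1
        have hroot4 : ∀ x, inb n x → rootf p4 f x = rootf p f x :=
          fun x hx => ((hss4.2.2 x hx).2).trans (hroot3 x hx)
        have hval3 : (ufFind fuel p2 (nidx n u)).1 = rootf p f (nidx n u) :=
          hfs3.1.trans (hroot2 _ hu'b)
        have hval4 : (ufFind fuel (ufFind fuel p2 (nidx n u)).2 (nidx n v)).1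
            = rootf p f (nidx n v) := hfs4.1.trans (hroot3 _ hv'b)
        have hru_b : inb n (rootf p f (nidx n u)) := rootf_inb n f p _ hE hu'b (hH _ hu'b)
        have hrv_b : inb n (rootf p f (nidx n v)) := rootf_inb n f p _ hE hv'b (hH _ hv'b)
        have hru_rt4 : isRootP p4 (rootf p f (nidx n u)) := by
          have := (rootf_isRoot p4 f (nidx n u) (hH4 _ hu'b)).1
          rwa [hroot4 _ hu'b] at this
        have hrv_rt4 : isRootP p4 (rootf p f (nidx n v)) := by
          have := (rootf_isRoot p4 f (nidx n v) (hH4 _ hv'b)).1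
          rwa [hroot4 _ hv'b] at this
        simp only [ufUnion]
        rw [hA3, hA4, hval3, hval4, if_pos hc]
        -- the three rank branches write the same class structure
        have main : ∀ (r1 r2 : Int) (rk' : List Int),
            r1 ≠ r2 →
            ((r1 = rootf p f (nidx n u) ∧ r2 = rootf p f (nidx n v)) ∨
             (r1 = rootf p f (nidx n v) ∧ r2 = rootf p f (nidx n u))) →
            kruskalLoopA fuel md tl (pvSetI p4 r2 r1) rk'
              (pvSetI (pvSetI deg u (pvGetI deg u + 1)) v
                (pvGetI (pvSetI deg u (pvGetI deg u + 1)) v + 1)) (mst ++ [(u, v, w)])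
            = kruskalLoopB md tl
              (lab.map fun t => if t = pvGetI lab (nidx n v) then pvGetI lab (nidx n u) else t)
              (pvSetI (pvSetI deg u (pvGetI deg u + 1)) v
                (pvGetI (pvSetI deg u (pvGetI deg u + 1)) v + 1)) (mst ++ [(u, v, w)]) := by
          intro r1 r2 rk' hne hcase
          have h1b : inb n r1 := by rcases hcase with ⟨e, _⟩ | ⟨e, _⟩ <;> rw [e] <;> assumption
          have h2b : inb n r2 := by rcases hcase with ⟨_, e⟩ | ⟨_, e⟩ <;> rw [e] <;> assumption
          have h1rt : isRootP p4 r1 := by rcases hcase with ⟨e, _⟩ | ⟨e, _⟩ <;> rw [e] <;> assumption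
          have h2rt : isRootP p4 r2 := by rcases hcase with ⟨_, e⟩ | ⟨_, e⟩ <;> rw [e] <;> assumption
          have hls := link_spec n f p4 r1 r2 hp4 hE4 hH4 h1b h2b h1rt h2rt hne
          have hCq : CoupleP n (f+1) (pvSetI p4 r2 r1)
              (lab.map fun t => if t = pvGetI lab (nidx n v) then pvGetI lab (nidx n u) else t) := by
            apply couple_after_link n f p _ lab (nidx n u) (nidx n v) r1 r2 hlab hu'b hv'b hC hcase
            intro x hx
            rw [(hls.2.2 x hx).2, hroot4 x hx]
          exact ih (pvSetI p4 r2 r1) rk'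
            (lab.map fun t => if t = pvGetI lab (nidx n v) then pvGetI lab (nidx n u) else t)
            (pvSetI (pvSetI deg u (pvGetI deg u + 1)) v
              (pvGetI (pvSetI deg u (pvGetI deg u + 1)) v + 1))
            (mst ++ [(u, v, w)]) (f+1) hls.1
            (by simp only [List.length_map]; exact hlab) hls.2.1
            (fun x hx => (hls.2.2 x hx).1) hBtl (by simp at hfuel ⊢; omega) hCq
        split_ifs with hr1 hr2
        · exact main (rootf p f (nidx n u)) (rootf p f (nidx n v)) rk hc (Or.inl ⟨rfl, rfl⟩)
        · exact main (rootf p f (nidx n v)) (rootf p f (nidx n u)) rk (fun h => hc h.symm) (Or.inr ⟨rfl, rfl⟩)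
        · exact main (rootf p f (nidx n u)) (rootf p f (nidx n v)) _ hc (Or.inl ⟨rfl, rfl⟩)
      · rw [if_neg hd, if_neg hd]
        exact ih p2 rk lab deg mst f hp2 hlab hE2 hH2 hBtl (by simp at hfuel ⊢; omega) hC2

lemma init_get (n : Nat) (x : Int) (hx : inb n x) :
    pvGetI ((List.range n).map Int.ofNat) x = x := by
  obtain ⟨h0, h1⟩ := hx
  rw [pvGetI_eq_getElem _ x h0 (by simpa using h1)]
  simp
  omega

theorem kruskal_mdc_ok (vertices : Int) (edges : List (Int × Int × Int)) (max_degree : Int)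
    (hPre : ∀ t ∈ edges, -vertices ≤ t.1 ∧ t.1 < vertices ∧ -vertices ≤ t.2.1 ∧ t.2.1 < vertices) :
    kruskal_mdc vertices edges max_degree = kruskal_mdc_alt vertices edges max_degree := by
  unfold kruskal_mdc kruskal_mdc_alt
  apply loop_eq _ vertices.toNat
  · simp
  · simp
  · intro x hx
    rw [init_get _ x hx]
    exact hx
  · intro x hx
    exact ⟨0, le_refl _, init_get _ x hx⟩
  · intro t ht
    have hb := hPre t ((PySem.List.mem_sorted _ _ _ _).mp ht)
    omega
  · omega
  · intro x y hx hy
    simp only [rootf]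
    rw [init_get _ x hx, init_get _ y hy]

-- ===== VERDICT (by name: the statement is the Claim_ definition above) =====
theorem kruskal_mdc_spec : Claim_equal_kruskal_mdc := by
  intro vertices edges max_degree _ hPre
  unfold Spec_kruskal_mdc
  exact kruskal_mdc_ok vertices edges max_degree hPre
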